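-- pv_equiv track=rewrite | github.com/matiasconde/Courses | Learning Computer Science with Python/Cap 14 HTTCC - Pygame Queens.py | has_clashes
-- ===== SOURCE A (Python) =====
-- def mod(x):
--     if x<0:
--         return -x
--     else:
--         return x
--
-- def has_clashes(board):
--     """ verifica que ninguna reina se cruce ni diagonalmente ni horizontalmente con un rival, el cruce vertical
--      se evita ya que la misma lista del tablero separa las columnas distintas"""
--     Value = False
--     for col, row in enumerate(board):
--         board_clone = board
--         board_reduced = board[0:col]+board[col+1:]
--         if row in board_reduced:
--             Value = True
--             return Value
--         else:
--             for col2,row2 in enumerate(board):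
--                 if col2 == col:
--                     continue
--                 elif mod(col2-col) == (row2-row):
--                     Value = True
--                     return Value
--     return Value
-- ===== SOURCE B (Python) =====
-- def has_clashes(board):
--     n = len(board)
--     diag1 = [row - col for col, row in enumerate(board)]
--     diag2 = [row + col for col, row in enumerate(board)]
--     return any(len(set(seq)) != n for seq in (board, diag1, diag2))
-- ===== Notes on version B (the rewrite author's own statement) =====
-- stated objective: simpler
-- what changed: Replaces the early-returning nested pairwise scan (with a hand-written abs and list slicing) by three set-uniqueness checks over the rows, the row-col and the row+col sequences.
import Mathlib
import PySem

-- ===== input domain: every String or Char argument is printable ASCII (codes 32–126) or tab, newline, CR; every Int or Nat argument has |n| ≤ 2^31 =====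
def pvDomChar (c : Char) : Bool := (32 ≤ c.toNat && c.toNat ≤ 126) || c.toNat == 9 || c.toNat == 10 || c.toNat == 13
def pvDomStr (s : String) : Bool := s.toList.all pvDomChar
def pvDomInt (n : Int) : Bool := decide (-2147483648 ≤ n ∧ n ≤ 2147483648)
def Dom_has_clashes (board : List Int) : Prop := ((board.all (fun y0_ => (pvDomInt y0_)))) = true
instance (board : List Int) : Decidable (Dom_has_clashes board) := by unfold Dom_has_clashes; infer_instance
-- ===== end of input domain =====

-- B replaces A's early-returning nested pairwise scan by three set-uniqueness checks
-- over the rows, the row-col and the row+col index sequences (objective: simpler).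

-- ===== PORT A =====
def pyMod (x : Int) : Int := if x < 0 then -x else x

-- inner 'for col2, row2 in enumerate(board)' loop of A
def hcInner (col : Int) (row : Int) : List (Int × Int) → Bool
  | [] => false
  | (col2, row2) :: rest =>
    if col2 = col then hcInner col row rest
    else if pyMod (col2 - col) = row2 - row then true
    else hcInner col row rest

-- outer 'for col, row in enumerate(board)' loop of A
def hcOuter (board : List Int) : List (Int × Int) → Bool
  | [] => false
  | (col, row) :: rest =>
    let board_reduced :=
      PySem.List.slice board (some 0) (some col) ++ PySem.List.slice board (some (col + 1)) none
    if board_reduced.contains row then true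
    else if hcInner col row (PySem.List.enumerate board 0) then true
    else hcOuter board rest

def has_clashes (board : List Int) : Bool :=
  hcOuter board (PySem.List.enumerate board 0)

-- ===== PORT B =====
def has_clashes_alt (board : List Int) : Bool :=
  let n : Int := (board.length : Int)
  let diag1 := (PySem.List.enumerate board 0).map (fun p => p.2 - p.1)
  let diag2 := (PySem.List.enumerate board 0).map (fun p => p.2 + p.1)
  [board, diag1, diag2].any (fun seq => decide (PySem.Set.len (PySem.Set.ofList seq) ≠ n))

-- ===== PRECONDITION & SPEC =====
def Spec_has_clashes (board : List Int) (out : Bool) : Prop := out = has_clashes_alt board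
instance (board : List Int) (out : Bool) : Decidable (Spec_has_clashes board out) := by unfold Spec_has_clashes; infer_instance

-- ===== CLAIM (what is proved, stated in full; the proofs are below) =====
def Claim_equal_has_clashes : Prop := ∀ (board : List Int), Dom_has_clashes board → Spec_has_clashes board (has_clashes board)

-- ===== LEMMAS AND PROOFS =====

-- the common pairwise characterisation of a clash
def ClashP (board : List Int) : Prop :=
  ∃ i j : Nat, ∃ hi : i < board.length, ∃ hj : j < board.length, i ≠ j ∧
    (board[i] = board[j] ∨ board[i] - (i : Int) = board[j] - (j : Int) ∨
     board[i] + (i : Int) = board[j] + (j : Int))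

lemma hcInner_true_iff (col row : Int) (l : List (Int × Int)) :
    hcInner col row l = true ↔ ∃ p ∈ l, p.1 ≠ col ∧ pyMod (p.1 - col) = p.2 - row := by
  induction l with
  | nil => simp [hcInner]
  | cons p rest ih =>
    obtain ⟨c2, r2⟩ := p
    by_cases h1 : c2 = col
    · simp [hcInner, h1, ih]
    · by_cases h2 : pyMod (c2 - col) = r2 - row
      · simp [hcInner, h1, h2]
      · simp [hcInner, h1, h2, ih]

lemma hcOuter_true_iff (board : List Int) (l : List (Int × Int)) :
    hcOuter board l = true ↔ ∃ p ∈ l,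
      (p.2 ∈ PySem.List.slice board (some 0) (some p.1) ++ PySem.List.slice board (some (p.1 + 1)) none
       ∨ hcInner p.1 p.2 (PySem.List.enumerate board 0) = true) := by
  induction l with
  | nil => simp [hcOuter]
  | cons p rest ih =>
    obtain ⟨c, r⟩ := p
    simp only [hcOuter]
    by_cases h1 : r ∈ PySem.List.slice board (some 0) (some c) ++ PySem.List.slice board (some (c + 1)) none
    · rw [if_pos (by simpa using h1)]
      exact iff_of_true rfl ⟨(c, r), List.mem_cons_self, Or.inl h1⟩
    · rw [if_neg (by simpa using h1)]
      by_cases h2 : hcInner c r (PySem.List.enumerate board 0) = true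
      · rw [if_pos h2]
        exact iff_of_true rfl ⟨(c, r), List.mem_cons_self, Or.inr h2⟩
      · rw [if_neg h2, ih]
        constructor
        · rintro ⟨p, hp, hc⟩
          exact ⟨p, List.mem_cons_of_mem _ hp, hc⟩
        · rintro ⟨p, hp, hc⟩
          rcases List.mem_cons.1 hp with rfl | hp'
          · rcases hc with hm | hi2
            · exact absurd hm h1
            · exact absurd hi2 h2
          · exact ⟨p, hp', hc⟩

lemma nodup_iff_setlen (xs : List Int) :
    (PySem.Set.ofList xs).length = xs.length ↔ xs.Nodup := by
  induction xs with
  | nil => simp [PySem.Set.ofList_nil]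
  | cons x xs ih =>
    rw [PySem.Set.ofList_cons]
    by_cases hx : x ∈ xs
    · have h1 : (PySem.Set.discard (PySem.Set.ofList xs) x).length < (PySem.Set.ofList xs).length := by
        apply List.length_filter_lt_length_iff_exists.mpr
        exact ⟨x, (PySem.Set.mem_ofList _ _).2 hx, by simp⟩
      have h2 : (PySem.Set.ofList xs).length ≤ xs.length := PySem.Set.length_ofList_le xs
      simp only [List.length_cons]
      constructor
      · intro h; omega
      · intro h; exact absurd hx (by simp_all [List.nodup_cons])
    · have h1 : PySem.Set.discard (PySem.Set.ofList xs) x = PySem.Set.ofList xs := by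
        apply List.filter_eq_self.mpr
        intro a ha
        have : a ∈ xs := (PySem.Set.mem_ofList _ _).1 ha
        simp; rintro rfl; exact hx this
      rw [h1]
      simp [List.nodup_cons, hx, ih]

lemma not_nodup_iff (xs : List Int) :
    ¬ xs.Nodup ↔ ∃ i j : Nat, ∃ hi : i < xs.length, ∃ hj : j < xs.length, i ≠ j ∧ xs[i] = xs[j] := by
  rw [List.nodup_iff_injective_get]
  constructor
  · intro h
    simp only [Function.Injective, not_forall] at h
    obtain ⟨a, b, hab, hne⟩ := h
    exact ⟨a, b, a.isLt, b.isLt, by simpa [Fin.ext_iff] using hne, by simpa [List.get] using hab⟩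
  · rintro ⟨i, j, hi, hj, hne, heq⟩ h
    have := h (a₁ := ⟨i, hi⟩) (a₂ := ⟨j, hj⟩) (by simpa [List.get] using heq)
    simp only [Fin.mk.injEq] at this
    exact hne this

lemma diag_not_nodup (board : List Int) (f : Int → Int → Int) :
    ¬ ((PySem.List.enumerate board 0).map (fun p => f p.2 p.1)).Nodup ↔
      ∃ i j : Nat, ∃ hi : i < board.length, ∃ hj : j < board.length, i ≠ j ∧
        f board[i] (i : Int) = f board[j] (j : Int) := by
  rw [not_nodup_iff]
  constructor
  · rintro ⟨i, j, hi, hj, hne, heq⟩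
    simp only [List.length_map, PySem.List.length_enumerate] at hi hj
    refine ⟨i, j, hi, hj, hne, ?_⟩
    simpa [List.getElem_map, PySem.List.getElem_enumerate] using heq
  · rintro ⟨i, j, hi, hj, hne, heq⟩
    refine ⟨i, j, by simpa [PySem.List.length_enumerate] using hi,
      by simpa [PySem.List.length_enumerate] using hj, hne, ?_⟩
    simpa [List.getElem_map, PySem.List.getElem_enumerate] using heq

lemma alt_iff (board : List Int) : has_clashes_alt board = true ↔ ClashP board := by
  have key : ∀ seq : List Int, seq.length = board.length →
      ((PySem.Set.len (PySem.Set.ofList seq) ≠ (board.length : Int)) ↔ ¬ seq.Nodup) := by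
    intro seq hlen
    rw [← nodup_iff_setlen]
    unfold PySem.Set.len
    omega
  unfold has_clashes_alt
  simp only [List.any_cons, List.any_nil, Bool.or_eq_true, Bool.or_false, decide_eq_true_eq]
  rw [key board rfl, key _ (by simp [PySem.List.length_enumerate]),
      key _ (by simp [PySem.List.length_enumerate])]
  rw [not_nodup_iff, diag_not_nodup board (fun r c => r - c), diag_not_nodup board (fun r c => r + c)]
  unfold ClashP
  constructor
  · rintro (⟨i, j, hi, hj, hne, h⟩ | ⟨i, j, hi, hj, hne, h⟩ | ⟨i, j, hi, hj, hne, h⟩)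
    · exact ⟨i, j, hi, hj, hne, Or.inl h⟩
    · exact ⟨i, j, hi, hj, hne, Or.inr (Or.inl h)⟩
    · exact ⟨i, j, hi, hj, hne, Or.inr (Or.inr h)⟩
  · rintro ⟨i, j, hi, hj, hne, (h | h | h)⟩
    · exact Or.inl ⟨i, j, hi, hj, hne, h⟩
    · exact Or.inr (Or.inl ⟨i, j, hi, hj, hne, h⟩)
    · exact Or.inr (Or.inr ⟨i, j, hi, hj, hne, h⟩)

lemma mem_reduced (board : List Int) (k : Nat) (r : Int) :
    r ∈ board.take k ++ board.drop (k + 1) ↔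
      ∃ j : Nat, ∃ hj : j < board.length, j ≠ k ∧ board[j] = r := by
  constructor
  · intro h
    rcases List.mem_append.1 h with h | h
    · obtain ⟨j, hj, hje⟩ := List.mem_iff_getElem.1 h
      have hj' : j < k ∧ j < board.length := by
        simp [List.length_take] at hj; omega
      exact ⟨j, hj'.2, by omega, by simpa [List.getElem_take] using hje⟩
    · obtain ⟨j, hj, hje⟩ := List.mem_iff_getElem.1 h
      have hj' : k + 1 + j < board.length := by
        simp [List.length_drop] at hj; omega
      exact ⟨k + 1 + j, hj', by omega, by simpa [List.getElem_drop] using hje⟩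
  · rintro ⟨j, hj, hne, hje⟩
    rcases Nat.lt_or_ge j k with h | h
    · exact List.mem_append.2 (Or.inl (List.mem_iff_getElem.2
        ⟨j, by simp [List.length_take]; omega, by simpa [List.getElem_take] using hje⟩))
    · have hgt : k + 1 ≤ j := by omega
      exact List.mem_append.2 (Or.inr (List.mem_iff_getElem.2
        ⟨j - (k + 1), by simp [List.length_drop]; omega, by
          rw [List.getElem_drop]
          have : k + 1 + (j - (k + 1)) = j := by omega
          simp_rw [this]; exact hje⟩))

lemma a_iff (board : List Int) : has_clashes board = true ↔ ClashP board := by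
  unfold has_clashes
  rw [hcOuter_true_iff]
  have hmem : ∀ k, ∀ hk : k < board.length,
      ((k : Int), board[k]) ∈ PySem.List.enumerate board 0 := by
    intro k hk
    exact (PySem.List.mem_enumerate_iff (p := ((k : Int), board[k])) (xs := board) (s := 0)).2 ⟨k, hk, by simp⟩
  have hred : ∀ k : Nat,
      PySem.List.slice board (some 0) (some (k : Int)) ++
        PySem.List.slice board (some ((k : Int) + 1)) none =
      board.take k ++ board.drop (k + 1) := by
    intro k
    rw [PySem.List.slice_zero_start, PySem.List.slice_to_natCast]
    have h1 : ((k : Int) + 1) = ((k + 1 : Nat) : Int) := by push_cast; ring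
    rw [h1, PySem.List.slice_from_natCast]
  constructor
  · rintro ⟨p, hp, hcase⟩
    obtain ⟨k, hk, rfl⟩ := (PySem.List.mem_enumerate_iff (p := p) (xs := board) (s := 0)).1 hp
    simp only [zero_add] at hcase
    rcases hcase with hmm | hin
    · rw [hred k] at hmm
      obtain ⟨j, hj, hne, hje⟩ := (mem_reduced board k board[k]).1 hmm
      exact ⟨k, j, hk, hj, fun h => hne h.symm, Or.inl hje.symm⟩
    · obtain ⟨q, hq, hqne, hqmod⟩ := (hcInner_true_iff _ _ _).1 hin
      obtain ⟨j, hj, rfl⟩ := (PySem.List.mem_enumerate_iff (p := q) (xs := board) (s := 0)).1 hq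
      simp only [zero_add] at hqne hqmod
      have hjk : k ≠ j := fun h => hqne (show ((j : Int)) = (k : Int) by exact_mod_cast h.symm)
      unfold pyMod at hqmod
      split_ifs at hqmod with hs
      · exact ⟨k, j, hk, hj, hjk, Or.inr (Or.inr (by omega))⟩
      · exact ⟨k, j, hk, hj, hjk, Or.inr (Or.inl (by omega))⟩
  · rintro ⟨i, j, hi, hj, hne, hdisj⟩
    have mk : ∀ a b : Nat, ∀ ha : a < board.length, ∀ hb : b < board.length, b ≠ a →
        pyMod ((b : Int) - (a : Int)) = board[b] - board[a] →
        ∃ p ∈ PySem.List.enumerate board 0,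
          (p.2 ∈ PySem.List.slice board (some 0) (some p.1) ++
              PySem.List.slice board (some (p.1 + 1)) none
           ∨ hcInner p.1 p.2 (PySem.List.enumerate board 0) = true) := by
      intro a b ha hb hban hmod
      refine ⟨((a : Int), board[a]), hmem a ha, Or.inr ((hcInner_true_iff _ _ _).2
        ⟨((b : Int), board[b]), hmem b hb, ?_, hmod⟩)⟩
      exact fun h => hban (by exact_mod_cast (show ((b : Int)) = (a : Int) from h))
    rcases hdisj with h | h | h
    · refine ⟨((i : Int), board[i]), hmem i hi, Or.inl ?_⟩
      rw [hred i]
      exact (mem_reduced board i board[i]).2 ⟨j, hj, fun hh => hne hh.symm, h.symm⟩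
    · rcases Nat.lt_or_ge i j with ho | ho
      · exact mk i j hi hj (by omega) (by unfold pyMod; split_ifs <;> omega)
      · exact mk j i hj hi (by omega) (by unfold pyMod; split_ifs <;> omega)
    · rcases Nat.lt_or_ge j i with ho | ho
      · exact mk i j hi hj (by omega) (by unfold pyMod; split_ifs <;> omega)
      · exact mk j i hj hi (by omega) (by unfold pyMod; split_ifs <;> omega)

-- ===== VERDICT (by name: the statement is the Claim_ definition above) =====
theorem has_clashes_spec : Claim_equal_has_clashes := by
  intro board _
  unfold Spec_has_clashes
  exact Bool.eq_iff_iff.mpr ((a_iff board).trans (alt_iff board).symm)
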